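-- pv_equiv track=rewrite | github.com/abaiao-r/Exploring_Hacker_News_Posts | data_extraction.py | extract_post_types
-- ===== SOURCE A (Python) =====
-- def extract_post_types(hn):
--     ask_posts = []
--     show_posts = []
--     other_posts = []
--
--     for post in hn:
--         title = post[1].lower()
--         if title.startswith("ask hn"):
--             ask_posts.append(post)
--         elif title.startswith("show hn"):
--             show_posts.append(post)
--         else:
--             other_posts.append(post)
--
--     return ask_posts, show_posts, other_posts
-- ===== SOURCE B (Python) =====
-- def _is(prefix, post):
--     return post[1].lower().startswith(prefix)
--
-- def extract_post_types(hn):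
--     ask_posts = [p for p in hn if _is("ask hn", p)]
--     show_posts = [p for p in hn if not _is("ask hn", p) and _is("show hn", p)]
--     other_posts = [p for p in hn if not _is("ask hn", p) and not _is("show hn", p)]
--     return ask_posts, show_posts, other_posts
-- ===== Notes on version B (the rewrite author's own statement) =====
-- stated objective: alternative
-- what changed: Replaces the single accumulating partition loop with three independent filtering passes (list comprehensions) over hn, one per category.
import Mathlib
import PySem

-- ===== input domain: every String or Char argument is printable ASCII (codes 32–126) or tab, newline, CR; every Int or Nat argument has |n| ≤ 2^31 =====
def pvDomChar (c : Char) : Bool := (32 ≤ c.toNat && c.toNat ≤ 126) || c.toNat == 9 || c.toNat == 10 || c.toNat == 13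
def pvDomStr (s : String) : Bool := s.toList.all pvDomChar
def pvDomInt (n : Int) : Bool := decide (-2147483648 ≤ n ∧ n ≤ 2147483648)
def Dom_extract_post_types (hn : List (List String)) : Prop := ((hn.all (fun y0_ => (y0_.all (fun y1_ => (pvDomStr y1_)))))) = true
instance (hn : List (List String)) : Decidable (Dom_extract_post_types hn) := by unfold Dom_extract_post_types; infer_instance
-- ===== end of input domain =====

-- B replaces A's single accumulating partition loop with three independent filter passes; same cost, different decomposition.


-- ===== PORT A =====
-- post[1] is ported with pyGet?; Pre_ guarantees the index is in range, so the .getD "" default is never taken on admitted inputs.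
def pvStep (acc : List (List String) × List (List String) × List (List String)) (post : List String) :
    List (List String) × List (List String) × List (List String) :=
  let title := PySem.Str.lower ((PySem.List.pyGet? post 1).getD "")
  if PySem.Str.startswith title "ask hn" then (acc.1 ++ [post], acc.2.1, acc.2.2)
  else if PySem.Str.startswith title "show hn" then (acc.1, acc.2.1 ++ [post], acc.2.2)
  else (acc.1, acc.2.1, acc.2.2 ++ [post])

def extract_post_types (hn : List (List String)) : List (List String) × List (List String) × List (List String) :=
  hn.foldl pvStep ([], [], [])

-- ===== PORT B =====
def pvIsPrefix (prefix_ : String) (post : List String) : Bool :=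
  PySem.Str.startswith (PySem.Str.lower ((PySem.List.pyGet? post 1).getD "")) prefix_

def extract_post_types_alt (hn : List (List String)) : List (List String) × List (List String) × List (List String) :=
  ( hn.filter (fun p => pvIsPrefix "ask hn" p)
  , hn.filter (fun p => !pvIsPrefix "ask hn" p && pvIsPrefix "show hn" p)
  , hn.filter (fun p => !pvIsPrefix "ask hn" p && !pvIsPrefix "show hn" p) )

-- ===== PRECONDITION & SPEC =====
-- Pre_ excludes posts with fewer than 2 fields, on which Python's post[1] raises IndexError in both A and B.
def Pre_extract_post_types (hn : List (List String)) : Prop :=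
  ∀ post ∈ hn, 2 ≤ post.length
instance (hn : List (List String)) : Decidable (Pre_extract_post_types hn) := by unfold Pre_extract_post_types; infer_instance
def pvWitness_extract_post_types : List (List String) :=
  [["1", "Ask HN: why"], ["2", "Show HN: thing"], ["3", "other title"]]
def Spec_extract_post_types (hn : List (List String)) (out : List (List String) × List (List String) × List (List String)) : Prop := out = extract_post_types_alt hn
instance (hn : List (List String)) (out : List (List String) × List (List String) × List (List String)) : Decidable (Spec_extract_post_types hn out) := by unfold Spec_extract_post_types; infer_instance

-- ===== CLAIM (what is proved, stated in full; the proofs are below) =====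
def Claim_equal_extract_post_types : Prop := ∀ (hn : List (List String)), Dom_extract_post_types hn → Pre_extract_post_types hn → Spec_extract_post_types hn (extract_post_types hn)

-- ===== LEMMAS AND PROOFS =====
-- Loop invariant: A's fold from any accumulator appends B's three filters.
theorem extract_fold_eq (hn : List (List String)) (a s o : List (List String)) :
    hn.foldl pvStep (a, s, o)
    = ( a ++ hn.filter (fun p => pvIsPrefix "ask hn" p)
      , s ++ hn.filter (fun p => !pvIsPrefix "ask hn" p && pvIsPrefix "show hn" p)
      , o ++ hn.filter (fun p => !pvIsPrefix "ask hn" p && !pvIsPrefix "show hn" p) ) := by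
  induction hn generalizing a s o with
  | nil => simp
  | cons p t ih =>
    rw [List.foldl_cons]
    simp only [List.filter_cons]
    by_cases h1 : pvIsPrefix "ask hn" p = true
    · have hs : pvStep (a, s, o) p = (a ++ [p], s, o) := by
        unfold pvIsPrefix at h1; simp only [pvStep, h1, if_true]
      rw [hs, ih]
      simp [h1]
    · by_cases h2 : pvIsPrefix "show hn" p = true
      · have hs : pvStep (a, s, o) p = (a, s ++ [p], o) := by
          unfold pvIsPrefix at h1 h2
          simp only [pvStep, h1, h2, if_true, Bool.false_eq_true, if_false]
        rw [hs, ih]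
        simp [h1, h2]
      · have hs : pvStep (a, s, o) p = (a, s, o ++ [p]) := by
          unfold pvIsPrefix at h1 h2
          simp only [pvStep, h1, h2, Bool.false_eq_true, if_false]
        rw [hs, ih]
        simp [h1, h2]

-- ===== VERDICT (by name: the statement is the Claim_ definition above) =====
theorem extract_post_types_spec : Claim_equal_extract_post_types := by
  intro hn _ _
  unfold Spec_extract_post_types extract_post_types extract_post_types_alt
  simpa using extract_fold_eq hn [] [] []
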